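-- pv_equiv track=rewrite | github.com/DavidJong05/ATP_David_de_Jong | Lexer.py | list_till_seperator
-- ===== SOURCE A (Python) =====
-- from typing import List, Tuple, Union, Dict
--
-- def list_till_seperator(lijst: List[str], seperator: chr) -> List[str]:
--     '''Creates a list till given seperator, this can be a char or a list of chars'''
--     if len(lijst) == 0:
--         return []
--     else:
--         head, *tail = lijst
--         if head in seperator:
--             return [head][:-1]
--         return [head] + list_till_seperator(tail, seperator)
-- ===== SOURCE B (Python) =====
-- def list_till_seperator(lijst, seperator):
--     idx = next((i for i, x in enumerate(lijst) if x in seperator), len(lijst))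
--     return list(lijst)[:idx]
-- ===== Notes on version B (the rewrite author's own statement) =====
-- stated objective: simpler
-- what changed: Replaces A's head/tail recursion that rebuilds the result with ++ by a single scan for the index of the first separator element followed by one prefix slice.
import Mathlib
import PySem

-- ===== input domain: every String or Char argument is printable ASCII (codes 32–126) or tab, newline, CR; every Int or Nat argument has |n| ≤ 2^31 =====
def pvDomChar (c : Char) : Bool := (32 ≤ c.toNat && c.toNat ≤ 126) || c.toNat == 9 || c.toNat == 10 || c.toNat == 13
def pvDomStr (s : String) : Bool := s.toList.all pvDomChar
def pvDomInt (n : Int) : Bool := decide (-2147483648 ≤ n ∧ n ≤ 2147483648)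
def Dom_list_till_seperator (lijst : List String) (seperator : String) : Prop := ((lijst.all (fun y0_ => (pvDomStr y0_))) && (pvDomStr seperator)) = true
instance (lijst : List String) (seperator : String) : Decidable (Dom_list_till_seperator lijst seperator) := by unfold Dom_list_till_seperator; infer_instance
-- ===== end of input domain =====

-- B replaces A's head/tail recursion with a find-the-first-separator-index scan plus one prefix slice (simpler decomposition).


-- ===== PORT A =====
def list_till_seperator (lijst : List String) (seperator : String) : List String :=
  match lijst with
  | [] => []
  | head :: tail =>
    if PySem.Str.isIn head seperator then
      PySem.List.slice [head] none (some (-1))   -- [head][:-1]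
    else
      [head] ++ list_till_seperator tail seperator

-- ===== PORT B =====
def list_till_seperator_alt (lijst : List String) (seperator : String) : List String :=
  let idx : Nat := (lijst.findIdx? (fun x => PySem.Str.isIn x seperator)).getD lijst.length
  PySem.List.slice lijst none (some (idx : Int))   -- list(lijst)[:idx]

-- ===== PRECONDITION & SPEC =====
def Spec_list_till_seperator (lijst : List String) (seperator : String) (out : List String) : Prop := out = list_till_seperator_alt lijst seperator
instance (lijst : List String) (seperator : String) (out : List String) : Decidable (Spec_list_till_seperator lijst seperator out) := by unfold Spec_list_till_seperator; infer_instance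

-- ===== CLAIM (what is proved, stated in full; the proofs are below) =====
def Claim_equal_list_till_seperator : Prop := ∀ (lijst : List String) (seperator : String), Dom_list_till_seperator lijst seperator → Spec_list_till_seperator lijst seperator (list_till_seperator lijst seperator)

-- ===== LEMMAS AND PROOFS =====
theorem alt_eq_take (l : List String) (s : String) :
    list_till_seperator_alt l s
      = l.take ((l.findIdx? (fun x => PySem.Str.isIn x s)).getD l.length) := by
  unfold list_till_seperator_alt
  rw [PySem.List.slice_to_natCast]

theorem list_till_seperator_eq_alt (lijst : List String) (seperator : String) :
    list_till_seperator lijst seperator = list_till_seperator_alt lijst seperator := by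
  rw [alt_eq_take]
  induction lijst with
  | nil => simp [list_till_seperator]
  | cons head tail ih =>
    by_cases h : PySem.Str.isIn head seperator = true
    all_goals simp only [PySem.Str.isIn_eq] at h
    · simp [list_till_seperator, h, List.findIdx?_cons, PySem.List.slice_to_neg_one]
    · simp only [list_till_seperator, h, if_neg, Bool.false_eq_true, List.findIdx?_cons, ih]
      rcases hf : tail.findIdx? (fun x => PySem.Str.isIn x seperator) with _ | i <;>
        simp [h, hf]

-- ===== VERDICT (by name: the statement is the Claim_ definition above) =====
theorem list_till_seperator_spec : Claim_equal_list_till_seperator := by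
  intro lijst seperator _
  exact list_till_seperator_eq_alt lijst seperator
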